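-- pv_equiv track=rewrite | github.com/a-sokolova-dev/tira | vko10/course.py | count
-- ===== SOURCE A (Python) =====
-- import math
--
-- def count(x):
--     # cool problem! really enjoyed it, took me some time to figure out.
--     # could be further optimized to use dp for memoization
--     # instead of recursion, but the principal remains the same.
--
--     if x < 40 or x > 64:
--         return 0
--
--     weeks = 8
--     min_t = 5
--     max_t = 8
--
--     def solve(tasks, w):
--         if w > weeks:
--             return 0
--         if tasks < 0:
--             return 0
--         if (tasks == 0 and w == weeks):
--             return 1
--
--         count = 0
--         for t in range(min_t, max_t + 1):
--             count += math.comb(max_t, t) * solve(tasks - t, w + 1)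
--
--         return count
--
--     return solve(x, 0) * math.factorial(x)
-- ===== SOURCE B (Python) =====
-- import math
--
-- def count(x):
--     # Bottom-up DP: dp[r] = number of ways to distribute r tasks over the
--     # remaining weeks (5..8 tasks per week, 8 weeks total), built iteratively.
--     if x < 40 or x > 64:
--         return 0
--     dp = [1] + [0] * 64
--     for _ in range(8):
--         dp = [sum(math.comb(8, t) * dp[r - t] for t in range(5, 9) if r - t >= 0)
--               for r in range(65)]
--     return dp[x] * math.factorial(x)
-- ===== Notes on version B (the rewrite author's own statement) =====
-- stated objective: alternative
-- what changed: Replaced A's top-down recursive solve (an exponential call tree) with an iterative bottom-up DP table dp[r] over remaining tasks, stepped once per week, then read off dp[x]*factorial(x).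
import Mathlib
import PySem

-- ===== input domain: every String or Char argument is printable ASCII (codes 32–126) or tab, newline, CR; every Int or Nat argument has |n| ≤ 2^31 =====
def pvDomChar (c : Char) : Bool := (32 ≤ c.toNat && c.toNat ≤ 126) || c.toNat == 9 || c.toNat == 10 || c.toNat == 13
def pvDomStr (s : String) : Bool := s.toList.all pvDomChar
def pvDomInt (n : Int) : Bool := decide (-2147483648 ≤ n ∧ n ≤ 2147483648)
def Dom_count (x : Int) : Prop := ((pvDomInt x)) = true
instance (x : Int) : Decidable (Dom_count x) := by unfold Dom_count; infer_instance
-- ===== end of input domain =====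

-- B replaces A's top-down recursion with an iterative bottom-up DP table (objective: alternative).

-- ===== PORT A =====
-- literal port of A's inner recursive `solve` (weeks=8, min_t=5, max_t=8);
-- `w` only ever takes the values 0..9 in A, so it is carried as a Nat
def count_solve (tasks : Int) (w : Nat) : Int :=
  if w > 8 then 0
  else if tasks < 0 then 0
  else if tasks = 0 ∧ w = 8 then 1
  else (PySem.List.pyRange 5 9 1).foldl
    (fun acc t => acc + (Nat.choose 8 t.toNat : Int) * count_solve (tasks - t) (w + 1)) 0
termination_by 9 - w
decreasing_by omega

def count (x : Int) : Int :=
  if x < 40 ∨ x > 64 then 0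
  else count_solve x 0 * (Nat.factorial x.toNat : Int)

-- ===== PORT B =====
-- one DP step: dp'[r] = Σ_{t=5..8, t≤r} C(8,t) * dp[r-t]
def count_step (dp : List Int) : List Int :=
  (List.range 65).map (fun r =>
    ((List.range' 5 4).map (fun t =>
      if t ≤ r then (Nat.choose 8 t : Int) * dp.getD (r - t) 0 else 0)).sum)

def count_alt (x : Int) : Int :=
  if x < 40 ∨ x > 64 then 0
  else
    let dp0 : List Int := 1 :: List.replicate 64 0
    let dp := (List.range 8).foldl (fun d _ => count_step d) dp0
    dp.getD x.toNat 0 * (Nat.factorial x.toNat : Int)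

-- ===== PRECONDITION & SPEC =====
def Spec_count (x : Int) (out : Int) : Prop := out = count_alt x
instance (x : Int) (out : Int) : Decidable (Spec_count x out) := by unfold Spec_count; infer_instance

-- ===== CLAIM (what is proved, stated in full; the proofs are below) =====
def Claim_equal_count : Prop := ∀ (x : Int), Dom_count x → Spec_count x (count x)

-- ===== LEMMAS AND PROOFS =====

theorem pv_pyRange_eval : PySem.List.pyRange 5 9 1 = [5, 6, 7, 8] := by decide

theorem pv_solve_neg (tasks : Int) (w : Nat) (h : tasks < 0) : count_solve tasks w = 0 := by
  rw [count_solve]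
  split_ifs with h1 h2 h3 <;> first | rfl | exact absurd h3.1 (by omega)

theorem pv_solve_too_late (tasks : Int) : count_solve tasks 9 = 0 := by
  rw [count_solve]; simp

theorem pv_solve_unfold (tasks : Int) (w : Nat) (hw : w ≤ 8) (h0 : 0 ≤ tasks)
    (hne : ¬(tasks = 0 ∧ w = 8)) :
    count_solve tasks w =
      56 * count_solve (tasks - 5) (w + 1) + 28 * count_solve (tasks - 6) (w + 1)
      + 8 * count_solve (tasks - 7) (w + 1) + 1 * count_solve (tasks - 8) (w + 1) := by
  rw [count_solve]
  rw [if_neg (by omega), if_neg (by omega), if_neg hne, pv_pyRange_eval]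
  simp only [List.foldl]
  norm_num [Int.toNat, Nat.choose]

-- value of one DP cell after a step, for indices inside the table
theorem pv_step_getD (dp : List Int) (r : Nat) (hr : r < 65) :
    (count_step dp).getD r 0 =
      (if 5 ≤ r then 56 * dp.getD (r - 5) 0 else 0)
      + (if 6 ≤ r then 28 * dp.getD (r - 6) 0 else 0)
      + (if 7 ≤ r then 8 * dp.getD (r - 7) 0 else 0)
      + (if 8 ≤ r then 1 * dp.getD (r - 8) 0 else 0) := by
  simp only [count_step, List.getD, List.getElem?_map, List.getElem?_range, hr, if_pos,
    List.range', List.map, List.sum_cons, List.sum_nil, Option.map_some, Option.getD_some]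
  norm_num [Nat.choose]
  split_ifs <;> ring

theorem pv_dp0_getD (r : Nat) :
    ((1 :: List.replicate 64 (0:Int)).getD r 0) = if r = 0 then 1 else 0 := by
  cases r with
  | zero => rfl
  | succ n =>
    simp only [List.getD, List.getElem?_cons_succ, List.getElem?_replicate]
    split <;> rfl

-- the core correspondence: A's recursion at week 8-d equals B's table after d DP steps
theorem pv_main (d : Nat) (hd : d ≤ 8) (r : Nat) (hr : r ≤ 64) :
    count_solve (r : Int) (8 - d) = (count_step^[d] (1 :: List.replicate 64 (0:Int))).getD r 0 := by
  induction d generalizing r with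
  | zero =>
    simp only [Function.iterate_zero, id, pv_dp0_getD, Nat.sub_zero]
    by_cases h0 : r = 0
    · subst h0
      rw [count_solve]; norm_num
    · rw [pv_solve_unfold (r : Int) 8 (by omega) (by positivity)
        (by push_neg; intro h; exact absurd (by exact_mod_cast h) h0)]
      rw [pv_solve_too_late, pv_solve_too_late, pv_solve_too_late, pv_solve_too_late]
      simp [h0]
  | succ d ih =>
    have hw : 8 - (d + 1) + 1 = 8 - d := by omega
    rw [Function.iterate_succ_apply', pv_step_getD _ r (by omega)]
    rw [pv_solve_unfold (r : Int) (8 - (d + 1)) (by omega) (by positivity)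
      (by push_neg; intro _; omega)]
    rw [hw]
    have term : ∀ t : Nat, 5 ≤ t → t ≤ 8 →
        count_solve ((r : Int) - (t : Int)) (8 - d) =
          (if t ≤ r then (count_step^[d] (1 :: List.replicate 64 (0:Int))).getD (r - t) 0 else 0) := by
      intro t ht5 ht8
      by_cases h : t ≤ r
      · rw [if_pos h]
        have hc : (r : Int) - (t : Int) = ((r - t : Nat) : Int) := by omega
        rw [hc, ih (by omega) (r - t) (by omega)]
      · rw [if_neg h]
        exact pv_solve_neg _ _ (by omega)
    have t5 := term 5 (by omega) (by omega)
    have t6 := term 6 (by omega) (by omega)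
    have t7 := term 7 (by omega) (by omega)
    have t8 := term 8 (by omega) (by omega)
    norm_num at t5 t6 t7 t8
    rw [t5, t6, t7, t8]
    split_ifs <;> simp [List.getD] <;> ring

theorem pv_foldl_const {α : Type} (f : α → α) (l : List Nat) (a : α) :
    l.foldl (fun d _ => f d) a = f^[l.length] a := by
  induction l generalizing a with
  | nil => rfl
  | cons x xs ih => simp [List.foldl, ih, Function.iterate_succ_apply]

-- ===== VERDICT (by name: the statement is the Claim_ definition above) =====
theorem count_spec : Claim_equal_count := by
  intro x _
  unfold Spec_count count count_alt
  by_cases h : x < 40 ∨ x > 64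
  · simp [h]
  · rw [if_neg h, if_neg h]
    push_neg at h
    have hx : x = ((x.toNat : Nat) : Int) := by omega
    have h64 : x.toNat ≤ 64 := by omega
    have hmain := pv_main 8 (le_refl 8) x.toNat h64
    simp only [Nat.sub_self] at hmain
    have hsolve : count_solve x 0 = (count_step^[8] (1 :: List.replicate 64 (0:Int))).getD x.toNat 0 := by
      conv_lhs => rw [hx]
      exact hmain
    simp only [pv_foldl_const, List.length_range]
    rw [hsolve]
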